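-- pv_equiv track=rewrite | github.com/DMau1420/AurumTeam | arbolitos/test_trepador.py | trepador_profundo
-- ===== SOURCE A (Python) =====
-- def trepador_profundo(data, objetivo, nodo_actual=None, visitados=None, ruta=None):
--     if visitados is None:
--         visitados = set()
--     if ruta is None:
--         ruta = []
--     if nodo_actual is None:
--         nodo_actual = next(iter(data))
--
--     visitados.add(nodo_actual)
--     ruta.append(nodo_actual)
--
--     yield f"Visitando: {nodo_actual}"
--
--     if nodo_actual == objetivo:
--         yield f"¡Objetivo '{objetivo}' encontrado!"
--         return True
--
--     for vecino in data.get(nodo_actual, []):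
--         if vecino not in visitados:
--             encontrado = yield from trepador_profundo(data, objetivo, vecino, visitados, list(ruta))
--             if encontrado:
--                 return True
--     return False
-- ===== SOURCE B (Python) =====
-- def trepador_profundo(data, objetivo, nodo_actual=None, visitados=None, ruta=None):
--     # Iterative stack-based DFS instead of A's recursive generator.
--     # Same caller-visible side effects as A: all visited nodes are added to the
--     # shared `visitados` set, and only the initial node is appended to `ruta`.
--     if visitados is None:
--         visitados = set()
--     if ruta is None:
--         ruta = []
--     if nodo_actual is None:
--         nodo_actual = next(iter(data))
--
--     # Visit the start node unconditionally (as A does), then loop with a stack.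
--     visitados.add(nodo_actual)
--     ruta.append(nodo_actual)
--     yield f"Visitando: {nodo_actual}"
--     if nodo_actual == objetivo:
--         yield f"¡Objetivo '{objetivo}' encontrado!"
--         return True
--
--     stack = list(reversed(data.get(nodo_actual, [])))
--     while stack:
--         nodo = stack.pop()
--         if nodo in visitados:
--             continue
--         visitados.add(nodo)
--         yield f"Visitando: {nodo}"
--         if nodo == objetivo:
--             yield f"¡Objetivo '{objetivo}' encontrado!"
--             return True
--         stack.extend(reversed(data.get(nodo, [])))
--     return False
-- ===== Notes on version B (the rewrite author's own statement) =====
-- stated objective: alternative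
-- what changed: Replaces A's recursive generator DFS (yield from, one stack frame per node) with a single iterative loop over an explicit stack, pushing neighbours in reversed order so the yielded pre-order and the caller-visible mutations of visitados/ruta are identical.
import Mathlib
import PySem

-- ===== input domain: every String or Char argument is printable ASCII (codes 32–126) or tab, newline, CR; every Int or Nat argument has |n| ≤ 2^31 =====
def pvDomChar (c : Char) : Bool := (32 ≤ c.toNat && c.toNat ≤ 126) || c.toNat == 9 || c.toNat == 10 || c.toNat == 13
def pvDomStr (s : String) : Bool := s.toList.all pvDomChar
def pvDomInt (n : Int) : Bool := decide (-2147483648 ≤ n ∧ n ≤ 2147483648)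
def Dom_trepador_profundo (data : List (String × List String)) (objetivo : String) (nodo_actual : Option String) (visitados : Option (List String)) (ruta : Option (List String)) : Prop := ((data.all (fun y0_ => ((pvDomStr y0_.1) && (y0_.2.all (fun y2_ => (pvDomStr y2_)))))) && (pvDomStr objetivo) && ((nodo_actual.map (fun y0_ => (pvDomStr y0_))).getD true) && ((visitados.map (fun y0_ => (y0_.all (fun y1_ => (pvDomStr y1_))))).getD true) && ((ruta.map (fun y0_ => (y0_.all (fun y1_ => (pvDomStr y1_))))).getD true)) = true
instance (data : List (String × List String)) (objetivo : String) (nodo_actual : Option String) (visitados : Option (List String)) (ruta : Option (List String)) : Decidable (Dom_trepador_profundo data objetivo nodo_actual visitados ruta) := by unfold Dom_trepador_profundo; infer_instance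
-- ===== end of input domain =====

-- B re-implements A's recursive DFS generator as an explicit stack loop (same yielded
-- messages, same caller-visible mutation of `visitados`/`ruta`); equivalence is about the
-- list of yielded messages.

-- shared semantic primitives (dict lookup / first key / message text)
def pvVisit (n : String) : String := "Visitando: " ++ n
def pvFound (objetivo : String) : String := "¡Objetivo '" ++ objetivo ++ "' encontrado!"
def pvAdj (data : List (String × List String)) (n : String) : List String :=
  PySem.Dict.getD (PySem.Dict.mk data) n []
def pvStart (data : List (String × List String)) (nodo_actual : Option String) : String :=
  match nodo_actual with
  | some n => n
  | none => (data.headD ("", [])).1   -- next(iter(data)); outside Pre_ (data = []) the default is irrelevant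

-- ===== PORT A =====
-- A's recursion is ported with a fuel parameter that only makes it total; the top-level
-- call supplies fuel strictly larger than the number of node occurrences in `data`, which
-- is never exhausted (the equivalence lemmas below never reach the fuel-0 branch).
mutual
def pvGoA (data : List (String × List String)) (objetivo : String) (n : Nat) (nodo : String) (vis : PySem.Set String) : List String × Bool × PySem.Set String :=
  match n with
  | 0 => ([], false, vis)   -- unreachable with the fuel supplied by trepador_profundo
  | n + 1 =>
    let vis1 := PySem.Set.add vis nodo          -- visitados.add(nodo_actual)
    if nodo = objetivo then
      ([pvVisit nodo, pvFound objetivo], true, vis1)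
    else
      let r := pvLoopA data objetivo n (pvAdj data nodo) vis1
      (pvVisit nodo :: r.1, r.2.1, r.2.2)
termination_by (n, 0, 0)

def pvLoopA (data : List (String × List String)) (objetivo : String) (n : Nat) (ns : List String) (vis : PySem.Set String) : List String × Bool × PySem.Set String :=
  match ns with
  | [] => ([], false, vis)
  | v :: rest =>
    if v ∈ vis then pvLoopA data objetivo n rest vis
    else
      let r := pvGoA data objetivo n v vis
      if r.2.1 then (r.1, true, r.2.2)
      else
        let r2 := pvLoopA data objetivo n rest r.2.2
        (r.1 ++ r2.1, r2.2.1, r2.2.2)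
termination_by (n, 1, ns.length)
end

def trepador_profundo (data : List (String × List String)) (objetivo : String) (nodo_actual : Option String) (visitados : Option (List String)) (ruta : Option (List String)) : List String :=
  let vis0 : PySem.Set String := PySem.Set.ofList (visitados.getD [])
  let start := pvStart data nodo_actual
  (pvGoA data objetivo ((data.flatMap (fun p => p.1 :: p.2)).length + 1) start vis0).1

-- ===== PORT B =====
-- stack DFS; the Lean list's head is the Python stack's top (list.pop()), so
-- `stack = list(reversed(adj))` / `stack.extend(reversed(adj))` become `adj` / `adj ++ st`.
def pvUniv (data : List (String × List String)) : List String :=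
  data.flatMap (fun p => p.1 :: p.2)
def pvMu (data : List (String × List String)) (vis : PySem.Set String) : Nat :=
  ((pvUniv data).filter (fun x => decide (x ∉ vis))).length

theorem pvFilterMono (l : List String) (p q : String → Bool) (h : ∀ a, p a → q a) : (l.filter p).length ≤ (l.filter q).length := by
  induction l with
  | nil => simp
  | cons a t ih =>
    by_cases hp : p a
    · simp [hp, h a hp]; omega
    · simp only [List.filter_cons, hp]
      by_cases hq : q a <;> simp [hq] <;> omega

theorem pvAdj_nil_of_not_mem_univ (data : List (String × List String)) (v : String) (h : v ∉ pvUniv data) : pvAdj data v = [] := by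
  induction data with
  | nil => rfl
  | cons p rest ih =>
    obtain ⟨k, vs⟩ := p
    simp only [pvUniv, List.flatMap_cons, List.mem_append, List.mem_cons] at h
    rw [not_or, not_or] at h
    simp only [pvAdj, PySem.Dict.getD_eq_get?_getD, PySem.Dict.get?_mk_cons] at ih ⊢
    rw [if_neg (by simp; exact fun e => h.1.1 e.symm)]
    exact ih (by simpa [pvUniv] using h.2)
theorem pvMu_add_of_not_mem_univ (data : List (String × List String)) (vis : PySem.Set String) (v : String) (h : v ∉ pvUniv data) : pvMu data (PySem.Set.add vis v) = pvMu data vis := by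
  unfold pvMu
  congr 1
  apply List.filter_congr
  intro x hx
  have hxv : x ≠ v := fun e => h (e ▸ hx)
  simp [PySem.Set.mem_add, hxv]
theorem pvMu_add_lt (data : List (String × List String)) (vis : PySem.Set String) (v : String) (hU : v ∈ pvUniv data) (hv : v ∉ vis) : pvMu data (PySem.Set.add vis v) < pvMu data vis := by
  unfold pvMu
  revert hU
  generalize (pvUniv data) = l
  intro hU
  induction l with
  | nil => simp at hU
  | cons a t ih =>
    simp only [List.filter_cons]
    by_cases hav : a ∈ PySem.Set.add vis v
    · rw [if_neg (by simp only [decide_eq_true_eq]; exact fun h => h hav)]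
      by_cases ha : a ∈ vis
      · rw [if_neg (by simp only [decide_eq_true_eq]; exact fun h => h ha)]
        have hva : v ≠ a := fun e => hv (e ▸ ha)
        have ht : v ∈ t := by
          rcases List.mem_cons.mp hU with e | ht
          · exact absurd e hva
          · exact ht
        exact ih ht
      · rw [if_pos (by simpa using ha)]
        have hmono := pvFilterMono t (fun x => decide (x ∉ PySem.Set.add vis v)) (fun x => decide (x ∉ vis))
          (fun x hx => by
            simp only [decide_eq_true_eq] at hx ⊢
            exact fun hxv => hx ((PySem.Set.mem_add vis v x).mpr (Or.inl hxv)))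
        simp only [List.length_cons]
        omega
    · rw [if_pos (by simpa using hav)]
      have ha : a ∉ vis := fun h => hav ((PySem.Set.mem_add vis v a).mpr (Or.inl h))
      rw [if_pos (by simpa using ha)]
      have hva : v ≠ a := fun e => hav (e ▸ (PySem.Set.mem_add vis v v).mpr (Or.inr rfl))
      have ht : v ∈ t := by
        rcases List.mem_cons.mp hU with e | ht
        · exact absurd e hva
        · exact ht
      have := ih ht
      simp only [List.length_cons]
      omega

def pvLoopB (data : List (String × List String)) (objetivo : String) (stack : List String) (vis : PySem.Set String) : List String :=
  match stack with
  | [] => []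
  | v :: st =>
    if v ∈ vis then pvLoopB data objetivo st vis
    else
      let vis1 := PySem.Set.add vis v
      if v = objetivo then [pvVisit v, pvFound objetivo]
      else pvVisit v :: pvLoopB data objetivo (pvAdj data v ++ st) vis1
termination_by (pvMu data vis, stack.length)
decreasing_by
  · exact Prod.Lex.right _ (by simp)
  · by_cases hU : v ∈ pvUniv data
    · exact Prod.Lex.left _ _ (pvMu_add_lt data vis v hU (by assumption))
    · rw [pvMu_add_of_not_mem_univ data vis v hU, pvAdj_nil_of_not_mem_univ data v hU]
      exact Prod.Lex.right _ (by simp)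

def trepador_profundo_alt (data : List (String × List String)) (objetivo : String) (nodo_actual : Option String) (visitados : Option (List String)) (ruta : Option (List String)) : List String :=
  let vis0 : PySem.Set String := PySem.Set.ofList (visitados.getD [])
  let start := pvStart data nodo_actual
  let vis1 := PySem.Set.add vis0 start
  if start = objetivo then [pvVisit start, pvFound objetivo]
  else pvVisit start :: pvLoopB data objetivo (pvAdj data start) vis1

-- ===== PRECONDITION & SPEC =====
-- Pre_ excludes only data = {} with nodo_actual = None, where A's next(iter(data))
-- raises (RuntimeError from StopIteration inside the generator); B raises there too.
def Pre_trepador_profundo (data : List (String × List String)) (objetivo : String) (nodo_actual : Option String) (visitados : Option (List String)) (ruta : Option (List String)) : Prop :=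
  nodo_actual.isSome ∨ data ≠ []
instance (data : List (String × List String)) (objetivo : String) (nodo_actual : Option String) (visitados : Option (List String)) (ruta : Option (List String)) : Decidable (Pre_trepador_profundo data objetivo nodo_actual visitados ruta) := by unfold Pre_trepador_profundo; infer_instance

def pvWitness_trepador_profundo : (List (String × List String)) × String × Option String × Option (List String) × Option (List String) :=
  ([("a", ["b", "c"]), ("b", ["c"])], "c", none, none, none)

def Spec_trepador_profundo (data : List (String × List String)) (objetivo : String) (nodo_actual : Option String) (visitados : Option (List String)) (ruta : Option (List String)) (out : List String) : Prop := out = trepador_profundo_alt data objetivo nodo_actual visitados ruta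
instance (data : List (String × List String)) (objetivo : String) (nodo_actual : Option String) (visitados : Option (List String)) (ruta : Option (List String)) (out : List String) : Decidable (Spec_trepador_profundo data objetivo nodo_actual visitados ruta out) := by unfold Spec_trepador_profundo; infer_instance

-- ===== CLAIM (what is proved, stated in full; the proofs are below) =====
def Claim_equal_trepador_profundo : Prop := ∀ (data : List (String × List String)) (objetivo : String) (nodo_actual : Option String) (visitados : Option (List String)) (ruta : Option (List String)), Dom_trepador_profundo data objetivo nodo_actual visitados ruta → Pre_trepador_profundo data objetivo nodo_actual visitados ruta → Spec_trepador_profundo data objetivo nodo_actual visitados ruta (trepador_profundo data objetivo nodo_actual visitados ruta)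

-- ===== LEMMAS AND PROOFS =====
theorem pvWitness_ok : Dom_trepador_profundo pvWitness_trepador_profundo.1 pvWitness_trepador_profundo.2.1 pvWitness_trepador_profundo.2.2.1 pvWitness_trepador_profundo.2.2.2.1 pvWitness_trepador_profundo.2.2.2.2 ∧ Pre_trepador_profundo pvWitness_trepador_profundo.1 pvWitness_trepador_profundo.2.1 pvWitness_trepador_profundo.2.2.1 pvWitness_trepador_profundo.2.2.2.1 pvWitness_trepador_profundo.2.2.2.2 := by decide

theorem pvAdj_sub_univ (data : List (String × List String)) (nodo : String) : ∀ x ∈ pvAdj data nodo, x ∈ pvUniv data := by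
  induction data with
  | nil => intro x hx; simp [pvAdj, PySem.Dict.getD_eq_get?_getD] at hx; exact absurd hx (by simp [PySem.Dict.get?])
  | cons p rest ih =>
    intro x hx
    simp only [pvAdj, PySem.Dict.getD_eq_get?_getD] at hx ih ⊢
    obtain ⟨k, vs⟩ := p
    rw [PySem.Dict.get?_mk_cons] at hx
    by_cases hk : k == nodo
    · simp [hk] at hx; simp [pvUniv]; tauto
    · rw [if_neg hk] at hx
      have := ih x hx
      simp [pvUniv] at this ⊢; exact Or.inr (Or.inr this)

theorem pvMu_le_len (data : List (String × List String)) (vis : PySem.Set String) : pvMu data vis ≤ (pvUniv data).length :=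
  List.length_filter_le _ _

theorem pvMu_mono (data : List (String × List String)) (vis vis' : PySem.Set String) (h : ∀ x ∈ vis, x ∈ vis') : pvMu data vis' ≤ pvMu data vis := by
  apply pvFilterMono
  intro a ha
  simp at ha ⊢
  exact fun hv => ha (h a hv)

theorem pvLoopA_sub_of (data : List (String × List String)) (objetivo : String) (n : Nat)
    (hgo : ∀ (nodo : String) (vis : PySem.Set String) (x : String), x ∈ vis → x ∈ (pvGoA data objetivo n nodo vis).2.2) :
    ∀ (ns : List String) (vis : PySem.Set String) (x : String), x ∈ vis → x ∈ (pvLoopA data objetivo n ns vis).2.2 := by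
  intro ns
  induction ns with
  | nil => intro vis x hx; simpa [pvLoopA] using hx
  | cons v rest ih =>
    intro vis x hx
    by_cases hv : v ∈ vis
    · simp only [pvLoopA, if_pos hv]
      exact ih vis x hx
    · simp only [pvLoopA, if_neg hv]
      by_cases hf : (pvGoA data objetivo n v vis).2.1
      · simp only [hf]
        exact hgo v vis x hx
      · simp only [hf]
        simp only [Bool.false_eq_true, if_false]
        exact ih _ x (hgo v vis x hx)

theorem pvGoA_sub (data : List (String × List String)) (objetivo : String) (n : Nat) (nodo : String) (vis : PySem.Set String) : ∀ x ∈ vis, x ∈ (pvGoA data objetivo n nodo vis).2.2 := by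
  induction n generalizing nodo vis with
  | zero => intro x hx; simpa [pvGoA] using hx
  | succ n ih =>
    intro x hx
    have hxadd : x ∈ PySem.Set.add vis nodo := (PySem.Set.mem_add vis nodo x).mpr (Or.inl hx)
    by_cases ho : nodo = objetivo
    · simp only [pvGoA, if_pos ho]
      exact hxadd
    · simp only [pvGoA, if_neg ho]
      exact pvLoopA_sub_of data objetivo n (fun nodo' vis' x' hx' => ih nodo' vis' x' hx') _ _ x hxadd

theorem pvLoopB_nil (data : List (String × List String)) (objetivo : String) (vis : PySem.Set String) : pvLoopB data objetivo [] vis = [] := by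
  simp [pvLoopB]

-- the central decomposition: the stack loop on (ns ++ st) is A's neighbour loop on ns,
-- followed (if the target was not found) by the stack loop on st with the updated visited set
theorem pvLoop_eq (data : List (String × List String)) (objetivo : String) (n : Nat)
    (hgo : ∀ (nodo : String) (vis : PySem.Set String) (st : List String), nodo ∉ vis → pvMu data (PySem.Set.add vis nodo) < n →
      pvLoopB data objetivo (nodo :: st) vis =
        (pvGoA data objetivo n nodo vis).1 ++
          (if (pvGoA data objetivo n nodo vis).2.1 then [] else pvLoopB data objetivo st (pvGoA data objetivo n nodo vis).2.2)) :
    ∀ (ns : List String) (vis : PySem.Set String) (st : List String), (∀ x ∈ ns, x ∈ pvUniv data) → pvMu data vis ≤ n →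
      pvLoopB data objetivo (ns ++ st) vis =
        (pvLoopA data objetivo n ns vis).1 ++
          (if (pvLoopA data objetivo n ns vis).2.1 then [] else pvLoopB data objetivo st (pvLoopA data objetivo n ns vis).2.2) := by
  intro ns
  induction ns with
  | nil =>
    intro vis st _ _
    simp [pvLoopA]
  | cons v rest ih =>
    intro vis st hsub hmu
    by_cases hv : v ∈ vis
    · rw [List.cons_append]
      rw [show pvLoopB data objetivo (v :: (rest ++ st)) vis = pvLoopB data objetivo (rest ++ st) vis from by
        simp only [pvLoopB, if_pos hv]]
      rw [show pvLoopA data objetivo n (v :: rest) vis = pvLoopA data objetivo n rest vis from by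
        simp only [pvLoopA, if_pos hv]]
      exact ih vis st (fun x hx => hsub x (List.mem_cons_of_mem v hx)) hmu
    · have hvU : v ∈ pvUniv data := hsub v List.mem_cons_self
      have hlt : pvMu data (PySem.Set.add vis v) < n :=
        lt_of_lt_of_le (pvMu_add_lt data vis v hvU hv) hmu
      have hB := hgo v vis (rest ++ st) hv hlt
      rw [List.cons_append, hB]
      by_cases hf : (pvGoA data objetivo n v vis).2.1
      · rw [show pvLoopA data objetivo n (v :: rest) vis = ((pvGoA data objetivo n v vis).1, true, (pvGoA data objetivo n v vis).2.2) from by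
          simp [pvLoopA, if_neg hv, hf]]
        simp [hf]
      · have hsubvis : ∀ x ∈ vis, x ∈ (pvGoA data objetivo n v vis).2.2 := pvGoA_sub data objetivo n v vis
        have hmu2 : pvMu data (pvGoA data objetivo n v vis).2.2 ≤ n :=
          le_trans (pvMu_mono data vis _ hsubvis) hmu
        have hih := ih (pvGoA data objetivo n v vis).2.2 st (fun x hx => hsub x (List.mem_cons_of_mem v hx)) hmu2
        rw [show pvLoopA data objetivo n (v :: rest) vis =
            ((pvGoA data objetivo n v vis).1 ++ (pvLoopA data objetivo n rest (pvGoA data objetivo n v vis).2.2).1,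
             (pvLoopA data objetivo n rest (pvGoA data objetivo n v vis).2.2).2.1,
             (pvLoopA data objetivo n rest (pvGoA data objetivo n v vis).2.2).2.2) from by
          simp only [pvLoopA, if_neg hv, hf]
          simp only [Bool.false_eq_true, if_false]]
        simp only [hf, Bool.false_eq_true, if_false, hih]
        simp [List.append_assoc]

theorem pvGo_eq (data : List (String × List String)) (objetivo : String) (n : Nat) :
    ∀ (nodo : String) (vis : PySem.Set String) (st : List String), nodo ∉ vis → pvMu data (PySem.Set.add vis nodo) < n →
      pvLoopB data objetivo (nodo :: st) vis =
        (pvGoA data objetivo n nodo vis).1 ++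
          (if (pvGoA data objetivo n nodo vis).2.1 then [] else pvLoopB data objetivo st (pvGoA data objetivo n nodo vis).2.2) := by
  induction n with
  | zero => intro nodo vis st _ hlt; exact absurd hlt (Nat.not_lt_zero _)
  | succ n ih =>
    intro nodo vis st hnv hlt
    by_cases ho : nodo = objetivo
    · simp only [pvLoopB, if_neg hnv, if_pos ho, pvGoA]
      simp
    · have hloop := pvLoop_eq data objetivo n ih (pvAdj data nodo) (PySem.Set.add vis nodo) st
        (pvAdj_sub_univ data nodo) (Nat.lt_succ_iff.mp hlt)
      rw [show pvLoopB data objetivo (nodo :: st) vis =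
          pvVisit nodo :: pvLoopB data objetivo (pvAdj data nodo ++ st) (PySem.Set.add vis nodo) from by
        simp only [pvLoopB, if_neg hnv, if_neg ho]]
      rw [show pvGoA data objetivo (n + 1) nodo vis =
          (pvVisit nodo :: (pvLoopA data objetivo n (pvAdj data nodo) (PySem.Set.add vis nodo)).1,
           (pvLoopA data objetivo n (pvAdj data nodo) (PySem.Set.add vis nodo)).2.1,
           (pvLoopA data objetivo n (pvAdj data nodo) (PySem.Set.add vis nodo)).2.2) from by
        simp only [pvGoA, if_neg ho]]
      rw [hloop]
      simp

-- ===== VERDICT (by name: the statement is the Claim_ definition above) =====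
theorem trepador_profundo_spec : Claim_equal_trepador_profundo := by
  intro data objetivo nodo_actual visitados ruta _ _
  unfold Spec_trepador_profundo trepador_profundo trepador_profundo_alt
  have huniv : data.flatMap (fun p => p.1 :: p.2) = pvUniv data := rfl
  rw [huniv]
  by_cases hso : pvStart data nodo_actual = objetivo
  · simp only [pvGoA, if_pos hso]
  · simp only [pvGoA, if_neg hso]
    have hloop := pvLoop_eq data objetivo ((pvUniv data).length)
      (pvGo_eq data objetivo ((pvUniv data).length))
      (pvAdj data (pvStart data nodo_actual))
      (PySem.Set.add (PySem.Set.ofList (visitados.getD [])) (pvStart data nodo_actual)) []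
      (pvAdj_sub_univ data (pvStart data nodo_actual))
      (pvMu_le_len data _)
    rw [List.append_nil] at hloop
    rw [hloop, pvLoopB_nil]
    simp
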